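-- pv_equiv track=rewrite | github.com/redredchen01/manga-tagger | app/domain/tag/allowed_list.py | build_prompt_fragment
-- ===== SOURCE A (Python) =====
-- from typing import Dict, List
--
-- CATEGORY_ORDER = ["character", "clothing", "body", "action", "theme", "style"]
--
-- CATEGORY_LABEL_ZH = {
--     "character": "角色 (Character)",
--     "clothing": "服裝 (Clothing)",
--     "body": "身體特徵 (Body)",
--     "action": "動作與互動 (Action)",
--     "theme": "主題 (Theme)",
--     "style": "藝術風格 (Style)",
-- }
--
-- def group_by_category(library: List[Dict]) -> Dict[str, List[Dict]]:
--     """Group library entries by their category field."""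
--     grouped: Dict[str, List[Dict]] = {}
--     for entry in library:
--         cat = entry.get("category", "other")
--         grouped.setdefault(cat, []).append(entry)
--     return grouped
--
-- def build_prompt_fragment(library: List[Dict]) -> str:
--     """Build a prompt fragment listing all allowed tags grouped by category.
--
--     Format:
--         ### 角色 (Character)
--         - 貓娘：貓耳貓尾
--         - 狐娘：狐耳狐尾
--
--         ### 服裝 (Clothing)
--         - 和服：日式
--         ...
--     """
--     grouped = group_by_category(library)
--     out_lines: List[str] = []
--     for cat in CATEGORY_ORDER:
--         entries = grouped.get(cat, [])
--         if not entries: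
--             continue
--         out_lines.append(f"### {CATEGORY_LABEL_ZH[cat]}")
--         for e in entries:
--             name = e.get("tag_name", "").strip()
--             desc = (e.get("description", "") or "").strip().replace("\n", " ")
--             if not name:
--                 continue
--             if desc:
--                 # Truncate overly long descriptions to keep prompt size sane
--                 if len(desc) > 60:
--                     desc = desc[:60] + "…"
--                 out_lines.append(f"- {name}：{desc}")
--             else:
--                 out_lines.append(f"- {name}")
--         out_lines.append("")  # blank line between sections
--     return "\n".join(out_lines).strip()
-- ===== SOURCE B (Python) =====
-- from typing import Dict, List, Optional
--
-- CATEGORY_ORDER = ["character", "clothing", "body", "action", "theme", "style"]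
--
-- CATEGORY_LABEL_ZH = {
--     "character": "角色 (Character)",
--     "clothing": "服裝 (Clothing)",
--     "body": "身體特徵 (Body)",
--     "action": "動作與互動 (Action)",
--     "theme": "主題 (Theme)",
--     "style": "藝術風格 (Style)",
-- }
--
-- def _format_entry(e: Dict) -> Optional[str]:
--     """Render one library entry as a bullet line, or None if it has no name."""
--     name = e.get("tag_name", "").strip()
--     if not name:
--         return None
--     desc = (e.get("description", "") or "").strip().replace("\n", " ")
--     if not desc:
--         return f"- {name}"
--     if len(desc) > 60:
--         desc = desc[:60] + "…"
--     return f"- {name}：{desc}"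
--
-- def build_prompt_fragment(library: List[Dict]) -> str:
--     """Single pass per category: no grouping dict, just a filter over the library."""
--     lines: List[str] = []
--     for cat in CATEGORY_ORDER:
--         entries = [e for e in library if e.get("category", "other") == cat]
--         if entries:
--             lines.append(f"### {CATEGORY_LABEL_ZH[cat]}")
--             lines.extend(line for line in map(_format_entry, entries) if line is not None)
--             lines.append("")
--     return "\n".join(lines).strip()
-- ===== Notes on version B (the rewrite author's own statement) =====
-- stated objective: simpler
-- what changed: Drops group_by_category and its grouping dict entirely: B scans the library once per fixed category with a filter and renders entries through an Optional-returning formatter, instead of building a category-keyed index first and then iterating it.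
import Mathlib
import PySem

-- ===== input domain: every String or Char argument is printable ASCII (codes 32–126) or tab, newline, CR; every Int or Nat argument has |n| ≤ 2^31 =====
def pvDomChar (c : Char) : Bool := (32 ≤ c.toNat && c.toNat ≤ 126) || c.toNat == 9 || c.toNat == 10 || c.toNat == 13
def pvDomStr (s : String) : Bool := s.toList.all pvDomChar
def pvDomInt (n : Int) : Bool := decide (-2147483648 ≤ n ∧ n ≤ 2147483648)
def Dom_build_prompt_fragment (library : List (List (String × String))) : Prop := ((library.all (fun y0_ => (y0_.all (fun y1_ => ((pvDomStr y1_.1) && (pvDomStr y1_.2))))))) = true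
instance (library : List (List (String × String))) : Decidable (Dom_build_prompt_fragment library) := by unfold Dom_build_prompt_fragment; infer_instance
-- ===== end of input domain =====

-- B drops the grouping dict and filters the library per category; equivalence of return values is proved below.

-- shared module constants / primitives (module-level context of both programs)
def CATEGORY_ORDER : List String := ["character", "clothing", "body", "action", "theme", "style"]

-- CATEGORY_LABEL_ZH[cat]; only ever looked up at members of CATEGORY_ORDER, where it is total
def labelZH (cat : String) : String :=
  if cat = "character" then "角色 (Character)"
  else if cat = "clothing" then "服裝 (Clothing)"
  else if cat = "body" then "身體特徵 (Body)"
  else if cat = "action" then "動作與互動 (Action)"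
  else if cat = "theme" then "主題 (Theme)"
  else "藝術風格 (Style)"

-- e.get(k, dflt) on an association-list dict (first match)
def entryGet (e : List (String × String)) (k dflt : String) : String :=
  match e.find? (fun p => p.1 == k) with
  | some p => p.2
  | none => dflt

-- ===== PORT A =====
def group_by_category (library : List (List (String × String))) :
    PySem.Dict String (List (List (String × String))) :=
  library.foldl
    (fun grouped entry =>
      grouped.modify (entryGet entry "category" "other") [] (fun l => l ++ [entry]))
    PySem.Dict.empty

def build_prompt_fragment (library : List (List (String × String))) : String :=
  let grouped := group_by_category library
  let out_lines : List String :=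
    CATEGORY_ORDER.foldl
      (fun out_lines cat =>
        let entries := grouped.getD cat []
        if entries = [] then out_lines
        else
          let out_lines := out_lines ++ ["### " ++ labelZH cat]
          let out_lines :=
            entries.foldl
              (fun out_lines e =>
                let name := PySem.Str.strip (entryGet e "tag_name" "")
                -- Python's '(… or "")' is the identity on str values; omitted
                let desc := PySem.Str.replace (PySem.Str.strip (entryGet e "description" "")) "\n" " "
                if name = "" then out_lines
                else if desc ≠ "" then
                  let desc :=
                    if 60 < PySem.Str.len desc then PySem.Str.slice desc none (some 60) ++ "…"
                    else desc
                  out_lines ++ ["- " ++ name ++ "：" ++ desc]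
                else out_lines ++ ["- " ++ name])
              out_lines
          out_lines ++ [""])
      []
  PySem.Str.strip (PySem.Str.join "\n" out_lines)

-- ===== PORT B =====
def format_entry (e : List (String × String)) : Option String :=
  let name := PySem.Str.strip (entryGet e "tag_name" "")
  if name = "" then none
  else
    let desc := PySem.Str.replace (PySem.Str.strip (entryGet e "description" "")) "\n" " "
    if desc = "" then some ("- " ++ name)
    else
      let desc :=
        if 60 < PySem.Str.len desc then PySem.Str.slice desc none (some 60) ++ "…"
        else desc
      some ("- " ++ name ++ "：" ++ desc)

def build_prompt_fragment_alt (library : List (List (String × String))) : String :=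
  let lines : List String :=
    CATEGORY_ORDER.flatMap (fun cat =>
      let entries := library.filter (fun e => entryGet e "category" "other" == cat)
      if entries = [] then []
      else ("### " ++ labelZH cat) :: (entries.filterMap format_entry ++ [""]))
  PySem.Str.strip (PySem.Str.join "\n" lines)

-- ===== PRECONDITION & SPEC =====
def Spec_build_prompt_fragment (library : List (List (String × String))) (out : String) : Prop := out = build_prompt_fragment_alt library
instance (library : List (List (String × String))) (out : String) : Decidable (Spec_build_prompt_fragment library out) := by unfold Spec_build_prompt_fragment; infer_instance

-- ===== CLAIM (what is proved, stated in full; the proofs are below) =====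
def Claim_equal_build_prompt_fragment : Prop := ∀ (library : List (List (String × String))), Dom_build_prompt_fragment library → Spec_build_prompt_fragment library (build_prompt_fragment library)

-- ===== LEMMAS AND PROOFS =====

-- A's grouping dict, read back at a category, is B's filter of the library
lemma grouped_getD (library : List (List (String × String))) (cat : String) :
    (group_by_category library).getD cat []
      = library.filter (fun e => entryGet e "category" "other" == cat) := by
  unfold group_by_category
  have h := PySem.Dict.getD_foldl_modify_append
      (library.map (fun e => (entryGet e "category" "other", e)))
      (PySem.Dict.empty (κ := String) (ν := List (List (String × String)))) cat
  rw [List.foldl_map] at h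
  simpa [List.filter_map, Function.comp_def] using h

-- A's inner entry loop is B's filterMap of the formatter
lemma inner_loop (entries : List (List (String × String))) (out : List String) :
    entries.foldl
      (fun out_lines e =>
        let name := PySem.Str.strip (entryGet e "tag_name" "")
        let desc := PySem.Str.replace (PySem.Str.strip (entryGet e "description" "")) "\n" " "
        if name = "" then out_lines
        else if desc ≠ "" then
          let desc :=
            if 60 < PySem.Str.len desc then PySem.Str.slice desc none (some 60) ++ "…"
            else desc
          out_lines ++ ["- " ++ name ++ "：" ++ desc]
        else out_lines ++ ["- " ++ name])
      out
      = out ++ entries.filterMap format_entry := by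
  induction entries generalizing out with
  | nil => simp
  | cons e rest ih =>
    simp only [List.foldl_cons, List.filterMap_cons, ih]
    unfold format_entry
    by_cases hn : PySem.Str.strip (entryGet e "tag_name" "") = "" <;>
      by_cases hd : PySem.Str.replace (PySem.Str.strip (entryGet e "description" "")) "\n" " " = "" <;>
      simp [hn, hd]

-- A's whole line-accumulating loop is B's flatMap over the category order
lemma lines_eq (library : List (List (String × String))) :
    CATEGORY_ORDER.foldl
      (fun out_lines cat =>
        let entries := (group_by_category library).getD cat []
        if entries = [] then out_lines
        else
          let out_lines := out_lines ++ ["### " ++ labelZH cat]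
          let out_lines :=
            entries.foldl
              (fun out_lines e =>
                let name := PySem.Str.strip (entryGet e "tag_name" "")
                let desc := PySem.Str.replace (PySem.Str.strip (entryGet e "description" "")) "\n" " "
                if name = "" then out_lines
                else if desc ≠ "" then
                  let desc :=
                    if 60 < PySem.Str.len desc then PySem.Str.slice desc none (some 60) ++ "…"
                    else desc
                  out_lines ++ ["- " ++ name ++ "：" ++ desc]
                else out_lines ++ ["- " ++ name])
              out_lines
          out_lines ++ [""])
      []
      = CATEGORY_ORDER.flatMap (fun cat =>
          let entries := library.filter (fun e => entryGet e "category" "other" == cat)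
          if entries = [] then []
          else ("### " ++ labelZH cat) :: (entries.filterMap format_entry ++ [""])) := by
  have hstep :
      (fun (out_lines : List String) (cat : String) =>
        let entries := (group_by_category library).getD cat []
        if entries = [] then out_lines
        else
          let out_lines := out_lines ++ ["### " ++ labelZH cat]
          let out_lines :=
            entries.foldl
              (fun out_lines e =>
                let name := PySem.Str.strip (entryGet e "tag_name" "")
                let desc := PySem.Str.replace (PySem.Str.strip (entryGet e "description" "")) "\n" " "
                if name = "" then out_lines
                else if desc ≠ "" then
                  let desc :=
                    if 60 < PySem.Str.len desc then PySem.Str.slice desc none (some 60) ++ "…"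
                    else desc
                  out_lines ++ ["- " ++ name ++ "：" ++ desc]
                else out_lines ++ ["- " ++ name])
              out_lines
          out_lines ++ [""])
      = (fun (acc : List String) (cat : String) => acc ++
          (fun cat =>
            let entries := library.filter (fun e => entryGet e "category" "other" == cat)
            if entries = [] then []
            else ("### " ++ labelZH cat) :: (entries.filterMap format_entry ++ [""])) cat) := by
    funext out cat
    simp only [grouped_getD, inner_loop]
    by_cases h : library.filter (fun e => entryGet e "category" "other" == cat) = [] <;>
      simp [h]
  rw [hstep, PySem.List.foldl_append_eq_flatMap, List.nil_append]

theorem build_prompt_fragment_eq (library : List (List (String × String))) :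
    build_prompt_fragment library = build_prompt_fragment_alt library :=
  congrArg PySem.Str.strip (congrArg (PySem.Str.join "\n") (lines_eq library))

-- ===== VERDICT (by name: the statement is the Claim_ definition above) =====
theorem build_prompt_fragment_spec : Claim_equal_build_prompt_fragment := by
  intro library _
  unfold Spec_build_prompt_fragment
  exact build_prompt_fragment_eq library
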